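-- pv_equiv track=rewrite | github.com/AssemblerEnjoyer/applied-universal-algebra | lr5.py | getGrinRelation
-- ===== SOURCE A (Python) =====
-- def getGrinRelation(matrix, array):
--     relation = []
--     n = len(matrix)
--     for i in range(n):
--         for j in range(i, n):
--             if set(matrix[i]) == set(matrix[j]):
--                 pair = (array[i], array[j])
--                 relation.append(pair)
--                 if i != j:
--                     pair = (array[j], array[i])
--                     relation.append(pair)
--     return relation
-- ===== SOURCE B (Python) =====
-- def getGrinRelation(matrix, array):
--     keys = [tuple(sorted(set(row))) for row in matrix]
--     groups = {}
--     for i, k in enumerate(keys):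
--         groups[k] = groups.get(k, []) + [i]
--     relation = []
--     for i, k in enumerate(keys):
--         relation.append((array[i], array[i]))
--         for j in groups[k]:
--             if i < j:
--                 relation.append((array[i], array[j]))
--                 relation.append((array[j], array[i]))
--     return relation
-- ===== Notes on version B (the rewrite author's own statement) =====
-- stated objective: faster
-- what changed: Instead of comparing set(matrix[i]) with set(matrix[j]) for every pair i<=j, B canonicalises each row once to a sorted tuple of its distinct elements, groups row indices by that key in one dict pass, and emits pairs only within each row's own group.
import Mathlib
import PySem

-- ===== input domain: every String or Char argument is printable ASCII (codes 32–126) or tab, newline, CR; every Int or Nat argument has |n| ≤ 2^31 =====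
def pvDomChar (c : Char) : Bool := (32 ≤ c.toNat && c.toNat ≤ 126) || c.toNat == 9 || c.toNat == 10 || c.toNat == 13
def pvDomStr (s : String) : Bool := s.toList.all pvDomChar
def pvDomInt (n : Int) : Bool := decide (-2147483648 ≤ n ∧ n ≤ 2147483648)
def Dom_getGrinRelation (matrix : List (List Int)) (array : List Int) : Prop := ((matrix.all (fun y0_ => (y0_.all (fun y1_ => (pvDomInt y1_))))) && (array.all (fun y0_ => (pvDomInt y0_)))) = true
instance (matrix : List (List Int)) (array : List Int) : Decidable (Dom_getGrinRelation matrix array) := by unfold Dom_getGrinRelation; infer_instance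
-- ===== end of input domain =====

-- B groups row indices by a canonical key (sorted distinct elements of the row) in one dict pass
-- and emits pairs within groups, instead of A's pairwise set comparisons.

-- ===== PORT A =====
def getGrinRelation (matrix : List (List Int)) (array : List Int) : List (Int × Int) :=
  let n : Int := matrix.length
  (PySem.List.pyRange 0 n 1).foldl (fun rel i =>
    (PySem.List.pyRange i n 1).foldl (fun rel j =>
      if PySem.Set.equal (PySem.Set.ofList (PySem.List.pyGetD matrix i []))
                         (PySem.Set.ofList (PySem.List.pyGetD matrix j [])) then
        let rel := rel ++ [(PySem.List.pyGetD array i 0, PySem.List.pyGetD array j 0)]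
        if i ≠ j then
          rel ++ [(PySem.List.pyGetD array j 0, PySem.List.pyGetD array i 0)]
        else rel
      else rel) rel) []

-- ===== PORT B =====
-- key of a row: tuple(sorted(set(row)))
def pvKey (row : List Int) : List Int :=
  PySem.List.sorted (PySem.Set.ofList row) (fun x => x) false

def getGrinRelation_alt (matrix : List (List Int)) (array : List Int) : List (Int × Int) :=
  let keys := matrix.map pvKey
  let groups : PySem.Dict (List Int) (List Int) :=
    (PySem.List.enumerate keys).foldl
      (fun d p => d.modify p.2 [] (· ++ [p.1])) PySem.Dict.empty
  (PySem.List.enumerate keys).foldl (fun rel p =>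
    let rel := rel ++ [(PySem.List.pyGetD array p.1 0, PySem.List.pyGetD array p.1 0)]
    (groups.getD p.2 []).foldl (fun rel j =>
      if p.1 < j then
        rel ++ [(PySem.List.pyGetD array p.1 0, PySem.List.pyGetD array j 0),
                (PySem.List.pyGetD array j 0, PySem.List.pyGetD array p.1 0)]
      else rel) rel) []

-- ===== PRECONDITION & SPEC =====
-- Pre_ excludes exactly the inputs where A raises IndexError: array shorter than matrix.
def Pre_getGrinRelation (matrix : List (List Int)) (array : List Int) : Prop :=
  matrix.length ≤ array.length
instance (matrix : List (List Int)) (array : List Int) : Decidable (Pre_getGrinRelation matrix array) := by unfold Pre_getGrinRelation; infer_instance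

def pvWitness_getGrinRelation : List (List Int) × List Int := ([[1, 2], [2, 1], [3]], [10, 20, 30])

def Spec_getGrinRelation (matrix : List (List Int)) (array : List Int) (out : List (Int × Int)) : Prop := out = getGrinRelation_alt matrix array
instance (matrix : List (List Int)) (array : List Int) (out : List (Int × Int)) : Decidable (Spec_getGrinRelation matrix array out) := by unfold Spec_getGrinRelation; infer_instance

-- ===== CLAIM (what is proved, stated in full; the proofs are below) =====
def Claim_equal_getGrinRelation : Prop := ∀ (matrix : List (List Int)) (array : List Int), Dom_getGrinRelation matrix array → Pre_getGrinRelation matrix array → Spec_getGrinRelation matrix array (getGrinRelation matrix array)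

-- ===== LEMMAS AND PROOFS =====

-- the two ordered pairs emitted for a matching pair i < j
def pvPairs (array : List Int) (i j : Int) : List (Int × Int) :=
  [(PySem.List.pyGetD array i 0, PySem.List.pyGetD array j 0),
   (PySem.List.pyGetD array j 0, PySem.List.pyGetD array i 0)]

def pvCond (matrix : List (List Int)) (i j : Int) : Bool :=
  PySem.Set.equal (PySem.Set.ofList (PySem.List.pyGetD matrix i []))
                  (PySem.Set.ofList (PySem.List.pyGetD matrix j []))

-- what A's inner loop body appends for (i, j)
def pvGAx (matrix : List (List Int)) (array : List Int) (i j : Int) : List (Int × Int) :=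
  if pvCond matrix i j then
    (PySem.List.pyGetD array i 0, PySem.List.pyGetD array j 0) ::
      (if i ≠ j then [(PySem.List.pyGetD array j 0, PySem.List.pyGetD array i 0)] else [])
  else []

-- what B's inner loop body appends for (i, j)
def pvGBx (array : List Int) (i j : Int) : List (Int × Int) :=
  if i < j then pvPairs array i j else []

def pvGroups (matrix : List (List Int)) : PySem.Dict (List Int) (List Int) :=
  (PySem.List.enumerate (matrix.map pvKey)).foldl
    (fun d p => d.modify p.2 [] (· ++ [p.1])) PySem.Dict.empty

theorem pvFoldl_shape {α β : Type} (l : List α) (f : List β → α → List β) (g : α → List β)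
    (h : ∀ acc x, f acc x = acc ++ g x) (acc : List β) :
    l.foldl f acc = acc ++ l.flatMap g := by
  rw [show f = fun acc x => acc ++ g x from funext fun a => funext fun x => h a x]
  exact PySem.List.foldl_append_eq_flatMap _ _ _

theorem pvFlatMap_congr {α β : Type} {l : List α} {f g : α → List β}
    (h : ∀ x ∈ l, f x = g x) : l.flatMap f = l.flatMap g := by
  simp only [List.flatMap_def]
  rw [List.map_congr_left h]

theorem pvFlatMap_if {α β : Type} (l : List α) (p : α → Bool) (f : α → List β) :
    (l.flatMap fun x => if p x then f x else []) = (l.filter p).flatMap f := by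
  induction l with
  | nil => simp
  | cons x t ih => by_cases h : p x <;> simp [h, ih]

theorem pvFlatMap_ite {α β : Type} (l : List α) (p : α → Prop) [DecidablePred p]
    (f : α → List β) :
    (l.flatMap fun x => if p x then f x else []) = (l.filter (fun x => decide (p x))).flatMap f := by
  induction l with
  | nil => simp
  | cons x t ih => by_cases h : p x <;> simp [h, ih]

theorem pvCond_iff (r s : List Int) :
    PySem.Set.equal (PySem.Set.ofList r) (PySem.Set.ofList s) = true ↔ pvKey r = pvKey s := by
  rw [PySem.Set.equal_iff]
  constructor
  · intro h
    unfold pvKey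
    have hp : (PySem.Set.ofList r).Perm (PySem.Set.ofList s) :=
      (List.perm_ext_iff_of_nodup (PySem.Set.nodup_ofList r) (PySem.Set.nodup_ofList s)).mpr h
    exact PySem.List.sorted_eq_sorted_of_perm _ _ _ (fun _ _ h => h) hp
  · intro h x
    have h1 : (x ∈ pvKey r) ↔ x ∈ PySem.Set.ofList r := by
      unfold pvKey; rw [PySem.List.mem_sorted]
    have h2 : (x ∈ pvKey s) ↔ x ∈ PySem.Set.ofList s := by
      unfold pvKey; rw [PySem.List.mem_sorted]
    rw [← h1, ← h2, h]

-- A as a flat list of blocks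
theorem pvA_shape (matrix : List (List Int)) (array : List Int) :
    getGrinRelation matrix array =
      (PySem.List.pyRange 0 (matrix.length : Int) 1).flatMap (fun i =>
        (PySem.List.pyRange i (matrix.length : Int) 1).flatMap (pvGAx matrix array i)) := by
  unfold getGrinRelation
  refine Eq.trans
    (pvFoldl_shape _ _
      (fun i => (PySem.List.pyRange i (matrix.length : Int) 1).flatMap (pvGAx matrix array i))
      (fun acc i => ?_) []) (by simp)
  refine Eq.trans
    (pvFoldl_shape _ _ (pvGAx matrix array i) (fun acc j => ?_) acc) rfl
  simp only [pvGAx, pvCond]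
  split_ifs <;> simp

-- B as a flat list of blocks
theorem pvB_shape (matrix : List (List Int)) (array : List Int) :
    getGrinRelation_alt matrix array =
      (PySem.List.enumerate (matrix.map pvKey)).flatMap (fun p =>
        (PySem.List.pyGetD array p.1 0, PySem.List.pyGetD array p.1 0) ::
          ((pvGroups matrix).getD p.2 []).flatMap (pvGBx array p.1)) := by
  unfold getGrinRelation_alt
  refine Eq.trans
    (pvFoldl_shape _ _
      (fun p => (PySem.List.pyGetD array p.1 0, PySem.List.pyGetD array p.1 0) ::
          ((pvGroups matrix).getD p.2 []).flatMap (pvGBx array p.1))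
      (fun acc p => ?_) []) (by simp)
  refine Eq.trans
    (pvFoldl_shape _ _ (pvGBx array p.1) (fun acc j => ?_)
      (acc ++ [(PySem.List.pyGetD array p.1 0, PySem.List.pyGetD array p.1 0)])) (by simp [pvGroups])
  simp only [pvGBx, pvPairs]
  split_ifs <;> simp

-- the group of key c is exactly the (increasing) list of indices whose row has key c
theorem pvG_char (matrix : List (List Int)) (c : List Int) :
    (pvGroups matrix).getD c [] =
      (PySem.List.pyRange 0 (matrix.length : Int) 1).filter
        (fun j => PySem.List.pyGetD (matrix.map pvKey) j [] == c) := by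
  unfold pvGroups
  have hswap : (PySem.List.enumerate (matrix.map pvKey)).foldl
      (fun d p => d.modify p.2 [] (· ++ [p.1])) PySem.Dict.empty
      = ((PySem.List.enumerate (matrix.map pvKey)).map (fun p => (p.2, p.1))).foldl
        (fun d q => d.modify q.1 [] (· ++ [q.2])) PySem.Dict.empty := by
    rw [List.foldl_map]
  rw [hswap, PySem.Dict.getD_foldl_modify_append]
  rw [PySem.List.enumerate_eq_map_pyRange (d := [])]
  simp [List.filter_map, List.map_map, Function.comp_def, PySem.List.len_eq]

-- lookup into the key list is the key of the looked-up row (pvKey [] = [] definitionally)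
theorem pvK_at (matrix : List (List Int)) (i : Int) :
    PySem.List.pyGetD (matrix.map pvKey) i [] = pvKey (PySem.List.pyGetD matrix i []) :=
  PySem.List.pyGetD_map pvKey matrix i []

theorem pvMain (matrix : List (List Int)) (array : List Int) :
    getGrinRelation matrix array = getGrinRelation_alt matrix array := by
  rw [pvA_shape, pvB_shape]
  rw [PySem.List.enumerate_eq_map_pyRange (d := [])]
  rw [List.flatMap_map]
  simp only [PySem.List.len_eq, List.length_map]
  apply Eq.symm
  apply pvFlatMap_congr
  intro i hi
  rw [PySem.List.mem_pyRange_one] at hi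
  obtain ⟨h0, hn⟩ := hi
  -- abbreviations
  have hKi := pvK_at matrix i
  -- A block at i: split off the diagonal term
  have hdiag : pvGAx matrix array i i =
      [(PySem.List.pyGetD array i 0, PySem.List.pyGetD array i 0)] := by
    have hc : pvCond matrix i i = true := by
      simp only [pvCond]; exact (pvCond_iff _ _).mpr rfl
    simp [pvGAx, hc]
  -- LHS of per-block goal (B side) and RHS (A side)
  have hL : (PySem.List.pyRange (i + 1) (matrix.length : Int) 1).flatMap (pvGAx matrix array i)
      = ((PySem.List.pyRange (i + 1) (matrix.length : Int) 1).filter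
          (fun j => PySem.List.pyGetD (matrix.map pvKey) j [] ==
                    PySem.List.pyGetD (matrix.map pvKey) i [])).flatMap (pvPairs array i) := by
    rw [← pvFlatMap_if]
    apply pvFlatMap_congr
    intro j hj
    rw [PySem.List.mem_pyRange_one] at hj
    have hij : i ≠ j := by omega
    rw [pvK_at matrix j, hKi]
    by_cases hc : pvKey (PySem.List.pyGetD matrix j []) = pvKey (PySem.List.pyGetD matrix i [])
    · have hcond : pvCond matrix i j = true := by
        simp only [pvCond]; exact (pvCond_iff _ _).mpr hc.symm
      simp [pvGAx, hcond, hij, hc, pvPairs]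
    · have hcond : pvCond matrix i j = false := by
        simp only [pvCond]
        rw [Bool.eq_false_iff]
        intro h
        exact hc ((pvCond_iff _ _).mp h).symm
      simp [pvGAx, hcond, hc]
  have hR : ((pvGroups matrix).getD (PySem.List.pyGetD (matrix.map pvKey) i []) []).flatMap
        (pvGBx array i)
      = ((PySem.List.pyRange (i + 1) (matrix.length : Int) 1).filter
          (fun j => PySem.List.pyGetD (matrix.map pvKey) j [] ==
                    PySem.List.pyGetD (matrix.map pvKey) i [])).flatMap (pvPairs array i) := by
    rw [pvG_char]
    have hunf : ∀ l : List Int, l.flatMap (pvGBx array i)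
        = (l.filter (fun j => decide (i < j))).flatMap (pvPairs array i) := by
      intro l
      rw [← pvFlatMap_ite]
      apply pvFlatMap_congr
      intro j _
      simp [pvGBx]
    rw [hunf, List.filter_filter]
    rw [PySem.List.pyRange_one_append 0 (i + 1) (matrix.length : Int) (by omega) (by omega)]
    rw [List.filter_append]
    have h1 : (PySem.List.pyRange 0 (i + 1) 1).filter
        (fun j => decide (i < j) && (PySem.List.pyGetD (matrix.map pvKey) j [] ==
                   PySem.List.pyGetD (matrix.map pvKey) i [])) = [] := by
      rw [List.filter_eq_nil_iff]
      intro j hj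
      rw [PySem.List.mem_pyRange_one] at hj
      simp only [Bool.and_eq_true, decide_eq_true_eq]
      rintro ⟨hlt, -⟩
      omega
    have h2 : (PySem.List.pyRange (i + 1) (matrix.length : Int) 1).filter
        (fun j => decide (i < j) && (PySem.List.pyGetD (matrix.map pvKey) j [] ==
                   PySem.List.pyGetD (matrix.map pvKey) i []))
        = (PySem.List.pyRange (i + 1) (matrix.length : Int) 1).filter
          (fun j => PySem.List.pyGetD (matrix.map pvKey) j [] ==
                    PySem.List.pyGetD (matrix.map pvKey) i []) := by
      apply List.filter_congr
      intro j hj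
      rw [PySem.List.mem_pyRange_one] at hj
      have : i < j := by omega
      simp [this]
    rw [h1, h2]
    simp
  -- assemble the block equality
  rw [PySem.List.pyRange_one_cons hn, List.flatMap_cons, hdiag, hL, hR]
  simp

-- ===== VERDICT (by name: the statement is the Claim_ definition above) =====
theorem getGrinRelation_spec : Claim_equal_getGrinRelation := by
  intro matrix array _ _
  unfold Spec_getGrinRelation
  exact pvMain matrix array
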